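-- pv_equiv track=rewrite | github.com/256thFission/duke-schedule-solver | scripts/pipeline/stage2_normalize.py | parse_course_requirements
-- ===== SOURCE A (Python) =====
-- from typing import List, Dict, Set
--
-- USE_REQUIREMENTS = {
--     'USE-ALP': 'ALP',   # Arts, Literature, and Performance
--     'USE-CZ': 'CZ',     # Civilizations
--     'USE-NS': 'NS',     # Natural Sciences
--     'USE-QS': 'QS',     # Quantitative Studies
--     'USE-SS': 'SS',     # Social Sciences
--     'USE-FL': 'FL',     # Foreign Language (rare)
--     'USE-W': 'W',       # Writing (rare)
-- }
--
-- CURR_REQUIREMENTS = {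
--     'CURR-CCI': 'CCI',  # Cross-Cultural Inquiry
--     'CURR-EI': 'EI',    # Ethical Inquiry
--     'CURR-FL': 'FL',    # Foreign Language
--     'CURR-R': 'R',      # Research
--     'CURR-STS': 'STS',  # Science, Technology, and Society
--     'CURR-W': 'W',      # Writing
-- }
--
-- TRIN_REQUIREMENTS = {
--     'TRIN-CE': 'CE',    # Creating & Engaging with Art
--     'TRIN-HI': 'HI',    # Humanistic Inquiry
--     'TRIN-IJ': 'IJ',    # Interpreting Institutions, Justice, & Power
--     'TRIN-LG': 'LG',    # Language
--     'TRIN-NW': 'NW',    # Investigating the Natural World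
--     'TRIN-QC': 'QC',    # Quantitative & Computational Reasoning
--     'TRIN-SB': 'SB',    # Social & Behavioral Analysis
--     'TRIN-WR': 'WR',    # Writing
-- }
--
-- def parse_course_requirements(raw_attrs: Set[str]) -> Dict[str, List[str]]:
--     """
--     Extract curriculum requirement codes from attributes.
--
--     Returns:
--         Dict with 'curr2000' (USE/CURR codes) and 'curr2025' (TRIN codes) lists,
--         plus 'all' for combined backward-compatible list
--     """
--     curr2000 = []
--     curr2025 = []
--
--     for attr in raw_attrs:
--         if attr in USE_REQUIREMENTS:
--             curr2000.append(USE_REQUIREMENTS[attr])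
--         elif attr in CURR_REQUIREMENTS:
--             curr2000.append(CURR_REQUIREMENTS[attr])
--         elif attr in TRIN_REQUIREMENTS:
--             curr2025.append(TRIN_REQUIREMENTS[attr])
--
--     return {
--         'curr2000': sorted(set(curr2000)),
--         'curr2025': sorted(set(curr2025)),
--         'all': sorted(set(curr2000 + curr2025))
--     }
-- ===== SOURCE B (Python) =====
-- USE_REQUIREMENTS = {
--     'USE-ALP': 'ALP',
--     'USE-CZ': 'CZ',
--     'USE-NS': 'NS',
--     'USE-QS': 'QS',
--     'USE-SS': 'SS',
--     'USE-FL': 'FL',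
--     'USE-W': 'W',
-- }
--
-- CURR_REQUIREMENTS = {
--     'CURR-CCI': 'CCI',
--     'CURR-EI': 'EI',
--     'CURR-FL': 'FL',
--     'CURR-R': 'R',
--     'CURR-STS': 'STS',
--     'CURR-W': 'W',
-- }
--
-- TRIN_REQUIREMENTS = {
--     'TRIN-CE': 'CE',
--     'TRIN-HI': 'HI',
--     'TRIN-IJ': 'IJ',
--     'TRIN-LG': 'LG',
--     'TRIN-NW': 'NW',
--     'TRIN-QC': 'QC',
--     'TRIN-SB': 'SB',
--     'TRIN-WR': 'WR',
-- }
--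
-- def parse_course_requirements(raw_attrs):
--     # Iterate the fixed requirement tables, not the input: one membership set,
--     # then set comprehensions keyed on the tables.
--     attrs = set(raw_attrs)
--     curr2000 = ({v for k, v in USE_REQUIREMENTS.items() if k in attrs}
--                 | {v for k, v in CURR_REQUIREMENTS.items() if k in attrs})
--     curr2025 = {v for k, v in TRIN_REQUIREMENTS.items() if k in attrs}
--     return {
--         'curr2000': sorted(curr2000),
--         'curr2025': sorted(curr2025),
--         'all': sorted(curr2000 | curr2025),
--     }
-- ===== Notes on version B (the rewrite author's own statement) =====
-- stated objective: idiomatic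
-- what changed: B iterates the three fixed requirement tables filtered through one membership set built from the input (set-comprehension intersections and a set union), instead of A's loop over raw_attrs with an if/elif chain; dedup+sort makes the traversal order immaterial.
import Mathlib
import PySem

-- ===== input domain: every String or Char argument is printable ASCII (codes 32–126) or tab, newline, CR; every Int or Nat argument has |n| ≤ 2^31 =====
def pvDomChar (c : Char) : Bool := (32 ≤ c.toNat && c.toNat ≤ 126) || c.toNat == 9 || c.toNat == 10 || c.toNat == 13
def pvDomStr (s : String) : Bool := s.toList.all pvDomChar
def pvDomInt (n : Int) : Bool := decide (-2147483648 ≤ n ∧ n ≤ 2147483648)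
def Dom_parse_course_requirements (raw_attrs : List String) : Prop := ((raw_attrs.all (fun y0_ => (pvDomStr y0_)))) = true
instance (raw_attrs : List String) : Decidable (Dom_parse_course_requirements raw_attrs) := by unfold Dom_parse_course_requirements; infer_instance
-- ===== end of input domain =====

-- B is an idiomatic restructuring: it iterates the three fixed requirement tables
-- filtered through one membership set built from the input, instead of A's loop
-- over raw_attrs with an if/elif chain; both return the same dict.


-- module-level constant dicts (shared by both ports, as in the Python module)
def USE_REQUIREMENTS : PySem.Dict String String := PySem.Dict.ofList
  [("USE-ALP", "ALP"), ("USE-CZ", "CZ"), ("USE-NS", "NS"), ("USE-QS", "QS"),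
   ("USE-SS", "SS"), ("USE-FL", "FL"), ("USE-W", "W")]

def CURR_REQUIREMENTS : PySem.Dict String String := PySem.Dict.ofList
  [("CURR-CCI", "CCI"), ("CURR-EI", "EI"), ("CURR-FL", "FL"), ("CURR-R", "R"),
   ("CURR-STS", "STS"), ("CURR-W", "W")]

def TRIN_REQUIREMENTS : PySem.Dict String String := PySem.Dict.ofList
  [("TRIN-CE", "CE"), ("TRIN-HI", "HI"), ("TRIN-IJ", "IJ"), ("TRIN-LG", "LG"),
   ("TRIN-NW", "NW"), ("TRIN-QC", "QC"), ("TRIN-SB", "SB"), ("TRIN-WR", "WR")]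

-- ===== PORT A =====
-- the for-loop over raw_attrs with the if/elif chain, accumulating (curr2000, curr2025)
def parse_course_requirements (raw_attrs : List String) : List (String × List String) :=
  let p : List String × List String := raw_attrs.foldl
    (fun acc attr =>
      if USE_REQUIREMENTS.contains attr then
        (acc.1 ++ [(USE_REQUIREMENTS.get? attr).getD ""], acc.2)
      else if CURR_REQUIREMENTS.contains attr then
        (acc.1 ++ [(CURR_REQUIREMENTS.get? attr).getD ""], acc.2)
      else if TRIN_REQUIREMENTS.contains attr then
        (acc.1, acc.2 ++ [(TRIN_REQUIREMENTS.get? attr).getD ""])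
      else acc)
    ([], [])
  [("curr2000", PySem.List.sorted (PySem.Set.ofList p.1) (fun x => x) false),
   ("curr2025", PySem.List.sorted (PySem.Set.ofList p.2) (fun x => x) false),
   ("all", PySem.List.sorted (PySem.Set.ofList (p.1 ++ p.2)) (fun x => x) false)]

-- ===== PORT B =====
-- set comprehensions over the fixed tables, filtered by one membership set
def parse_course_requirements_alt (raw_attrs : List String) : List (String × List String) :=
  let attrs : PySem.Set String := PySem.Set.ofList raw_attrs
  let curr2000 : PySem.Set String :=
    PySem.Set.union
      (PySem.Set.ofList ((USE_REQUIREMENTS.items.filter (fun kv => PySem.Set.contains attrs kv.1)).map (·.2)))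
      (PySem.Set.ofList ((CURR_REQUIREMENTS.items.filter (fun kv => PySem.Set.contains attrs kv.1)).map (·.2)))
  let curr2025 : PySem.Set String :=
    PySem.Set.ofList ((TRIN_REQUIREMENTS.items.filter (fun kv => PySem.Set.contains attrs kv.1)).map (·.2))
  [("curr2000", PySem.List.sorted curr2000 (fun x => x) false),
   ("curr2025", PySem.List.sorted curr2025 (fun x => x) false),
   ("all", PySem.List.sorted (PySem.Set.union curr2000 curr2025) (fun x => x) false)]

-- ===== PRECONDITION & SPEC =====
def Spec_parse_course_requirements (raw_attrs : List String) (out : List (String × List String)) : Prop := out = parse_course_requirements_alt raw_attrs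
instance (raw_attrs : List String) (out : List (String × List String)) : Decidable (Spec_parse_course_requirements raw_attrs out) := by unfold Spec_parse_course_requirements; infer_instance

-- ===== CLAIM (what is proved, stated in full; the proofs are below) =====
def Claim_equal_parse_course_requirements : Prop := ∀ (raw_attrs : List String), Dom_parse_course_requirements raw_attrs → Spec_parse_course_requirements raw_attrs (parse_course_requirements raw_attrs)


-- ===== LEMMAS AND PROOFS =====

-- per-attribute contribution of A's loop to curr2000
def pvG1 (a : String) : List String :=
  if USE_REQUIREMENTS.contains a then [(USE_REQUIREMENTS.get? a).getD ""]
  else if CURR_REQUIREMENTS.contains a then [(CURR_REQUIREMENTS.get? a).getD ""]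
  else []

-- per-attribute contribution of A's loop to curr2025
def pvG2 (a : String) : List String :=
  if USE_REQUIREMENTS.contains a then []
  else if CURR_REQUIREMENTS.contains a then []
  else if TRIN_REQUIREMENTS.contains a then [(TRIN_REQUIREMENTS.get? a).getD ""]
  else []

-- A's fold decomposes attribute-wise
lemma pvFold_eq (raw : List String) (acc : List String × List String) :
    raw.foldl
      (fun acc attr =>
        if USE_REQUIREMENTS.contains attr then
          (acc.1 ++ [(USE_REQUIREMENTS.get? attr).getD ""], acc.2)
        else if CURR_REQUIREMENTS.contains attr then
          (acc.1 ++ [(CURR_REQUIREMENTS.get? attr).getD ""], acc.2)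
        else if TRIN_REQUIREMENTS.contains attr then
          (acc.1, acc.2 ++ [(TRIN_REQUIREMENTS.get? attr).getD ""])
        else acc)
      acc
    = (acc.1 ++ raw.flatMap pvG1, acc.2 ++ raw.flatMap pvG2) := by
  induction raw generalizing acc with
  | nil => simp
  | cons a t ih =>
    simp only [List.foldl_cons, List.flatMap_cons, ih]
    unfold pvG1 pvG2
    split_ifs <;> simp

-- key sets of the three tables are pairwise disjoint
lemma pvCurr_not_use (a : String) (h : CURR_REQUIREMENTS.contains a = true) :
    USE_REQUIREMENTS.contains a = false := by
  have hm : a ∈ CURR_REQUIREMENTS.keys :=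
    (PySem.Dict.contains_iff_mem_keys _ _).mp h
  have : a ∈ ["CURR-CCI", "CURR-EI", "CURR-FL", "CURR-R", "CURR-STS", "CURR-W"] := hm
  simp only [List.mem_cons, List.not_mem_nil, or_false] at this
  rcases this with rfl | rfl | rfl | rfl | rfl | rfl <;> decide

lemma pvTrin_not_use (a : String) (h : TRIN_REQUIREMENTS.contains a = true) :
    USE_REQUIREMENTS.contains a = false := by
  have hm : a ∈ TRIN_REQUIREMENTS.keys :=
    (PySem.Dict.contains_iff_mem_keys _ _).mp h
  have : a ∈ ["TRIN-CE", "TRIN-HI", "TRIN-IJ", "TRIN-LG", "TRIN-NW", "TRIN-QC", "TRIN-SB", "TRIN-WR"] := hm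
  simp only [List.mem_cons, List.not_mem_nil, or_false] at this
  rcases this with rfl | rfl | rfl | rfl | rfl | rfl | rfl | rfl <;> decide

lemma pvTrin_not_curr (a : String) (h : TRIN_REQUIREMENTS.contains a = true) :
    CURR_REQUIREMENTS.contains a = false := by
  have hm : a ∈ TRIN_REQUIREMENTS.keys :=
    (PySem.Dict.contains_iff_mem_keys _ _).mp h
  have : a ∈ ["TRIN-CE", "TRIN-HI", "TRIN-IJ", "TRIN-LG", "TRIN-NW", "TRIN-QC", "TRIN-SB", "TRIN-WR"] := hm
  simp only [List.mem_cons, List.not_mem_nil, or_false] at this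
  rcases this with rfl | rfl | rfl | rfl | rfl | rfl | rfl | rfl <;> decide

lemma pvMem_g1 (a x : String) :
    x ∈ pvG1 a ↔ USE_REQUIREMENTS.get? a = some x ∨ CURR_REQUIREMENTS.get? a = some x := by
  unfold pvG1
  constructor
  · intro hx
    split_ifs at hx with h1 h2
    · left
      have := (PySem.Dict.contains_eq_isSome_get? USE_REQUIREMENTS a) ▸ h1
      cases hg : USE_REQUIREMENTS.get? a with
      | none => rw [hg] at this; simp at this
      | some v => simp [hg] at hx; simp [hx]
    · right
      have := (PySem.Dict.contains_eq_isSome_get? CURR_REQUIREMENTS a) ▸ h2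
      cases hg : CURR_REQUIREMENTS.get? a with
      | none => rw [hg] at this; simp at this
      | some v => simp [hg] at hx; simp [hx]
    · simp at hx
  · intro hx
    rcases hx with hx | hx
    · have hc : USE_REQUIREMENTS.contains a = true := by
        rw [PySem.Dict.contains_eq_isSome_get?, hx]; rfl
      simp [hc, hx]
    · have hc : CURR_REQUIREMENTS.contains a = true := by
        rw [PySem.Dict.contains_eq_isSome_get?, hx]; rfl
      simp [pvCurr_not_use a hc, hc, hx]

lemma pvMem_g2 (a x : String) :
    x ∈ pvG2 a ↔ TRIN_REQUIREMENTS.get? a = some x := by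
  unfold pvG2
  constructor
  · intro hx
    split_ifs at hx with h1 h2 h3
    · simp at hx
    · simp at hx
    · have := (PySem.Dict.contains_eq_isSome_get? TRIN_REQUIREMENTS a) ▸ h3
      cases hg : TRIN_REQUIREMENTS.get? a with
      | none => rw [hg] at this; simp at this
      | some v => simp [hg] at hx; simp [hx]
    · simp at hx
  · intro hx
    have hc : TRIN_REQUIREMENTS.contains a = true := by
      rw [PySem.Dict.contains_eq_isSome_get?, hx]; rfl
    simp [pvTrin_not_use a hc, pvTrin_not_curr a hc, hc, hx]

-- membership in a B-side comprehension set
lemma pvMem_compr (d : PySem.Dict String String) (hd : d.keys.Nodup) (raw : List String) (x : String) :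
    x ∈ PySem.Set.ofList ((d.items.filter (fun kv => PySem.Set.contains (PySem.Set.ofList raw) kv.1)).map (fun kv => kv.2)) ↔
      ∃ a ∈ raw, d.get? a = some x := by
  rw [PySem.Set.mem_ofList]
  simp only [List.mem_map, List.mem_filter]
  constructor
  · rintro ⟨⟨k, v⟩, ⟨hi, hc⟩, rfl⟩
    refine ⟨k, ?_, (PySem.Dict.get?_eq_some_iff_mem_items _ _ _ hd).mpr hi⟩
    have := (PySem.Set.contains_iff _ _).mp hc
    exact (PySem.Set.mem_ofList _ _).mp this
  · rintro ⟨a, ha, hg⟩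
    refine ⟨(a, x), ⟨(PySem.Dict.get?_eq_some_iff_mem_items _ _ _ hd).mp hg, ?_⟩, rfl⟩
    exact (PySem.Set.contains_iff _ _).mpr ((PySem.Set.mem_ofList _ _).mpr ha)

-- sorted(set(·)) depends only on membership
lemma pvSorted_ext (l s : List String) (hs : s.Nodup)
    (h : ∀ x, x ∈ l ↔ x ∈ s) :
    PySem.List.sorted (PySem.Set.ofList l) (fun x => x) false
      = PySem.List.sorted s (fun x => x) false := by
  apply PySem.List.sorted_eq_sorted_of_perm _ _ _ (fun a b hab => hab)
  rw [List.perm_ext_iff_of_nodup (PySem.Set.nodup_ofList _) hs]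
  intro x
  rw [PySem.Set.mem_ofList]
  exact h x

-- ===== VERDICT (by name: the statement is the Claim_ definition above) =====
theorem parse_course_requirements_spec : Claim_equal_parse_course_requirements := by
  intro raw _
  unfold Spec_parse_course_requirements parse_course_requirements parse_course_requirements_alt
  simp only [pvFold_eq, List.nil_append]
  have hUse : USE_REQUIREMENTS.keys.Nodup := by decide
  have hCurr : CURR_REQUIREMENTS.keys.Nodup := by decide
  have hTrin : TRIN_REQUIREMENTS.keys.Nodup := by decide
  have h2000 : ∀ x, x ∈ raw.flatMap pvG1 ↔
      x ∈ PySem.Set.union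
        (PySem.Set.ofList ((USE_REQUIREMENTS.items.filter (fun kv => PySem.Set.contains (PySem.Set.ofList raw) kv.1)).map (fun kv => kv.2)))
        (PySem.Set.ofList ((CURR_REQUIREMENTS.items.filter (fun kv => PySem.Set.contains (PySem.Set.ofList raw) kv.1)).map (fun kv => kv.2))) := by
    intro x
    rw [PySem.Set.mem_union, pvMem_compr _ hUse, pvMem_compr _ hCurr, List.mem_flatMap]
    constructor
    · rintro ⟨a, ha, hx⟩
      rcases (pvMem_g1 a x).mp hx with h | h
      · exact Or.inl ⟨a, ha, h⟩
      · exact Or.inr ⟨a, ha, h⟩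
    · rintro (⟨a, ha, h⟩ | ⟨a, ha, h⟩)
      · exact ⟨a, ha, (pvMem_g1 a x).mpr (Or.inl h)⟩
      · exact ⟨a, ha, (pvMem_g1 a x).mpr (Or.inr h)⟩
  have h2025 : ∀ x, x ∈ raw.flatMap pvG2 ↔
      x ∈ PySem.Set.ofList ((TRIN_REQUIREMENTS.items.filter (fun kv => PySem.Set.contains (PySem.Set.ofList raw) kv.1)).map (fun kv => kv.2)) := by
    intro x
    rw [pvMem_compr _ hTrin, List.mem_flatMap]
    constructor
    · rintro ⟨a, ha, hx⟩; exact ⟨a, ha, (pvMem_g2 a x).mp hx⟩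
    · rintro ⟨a, ha, h⟩; exact ⟨a, ha, (pvMem_g2 a x).mpr h⟩
  have e1 := pvSorted_ext (raw.flatMap pvG1) _
    (PySem.Set.nodup_union _ _ (PySem.Set.nodup_ofList _)) h2000
  have e2 := pvSorted_ext (raw.flatMap pvG2) _
    (PySem.Set.nodup_ofList _) h2025
  have e3 := pvSorted_ext (raw.flatMap pvG1 ++ raw.flatMap pvG2)
    (PySem.Set.union
      (PySem.Set.union
        (PySem.Set.ofList ((USE_REQUIREMENTS.items.filter (fun kv => PySem.Set.contains (PySem.Set.ofList raw) kv.1)).map (fun kv => kv.2)))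
        (PySem.Set.ofList ((CURR_REQUIREMENTS.items.filter (fun kv => PySem.Set.contains (PySem.Set.ofList raw) kv.1)).map (fun kv => kv.2))))
      (PySem.Set.ofList ((TRIN_REQUIREMENTS.items.filter (fun kv => PySem.Set.contains (PySem.Set.ofList raw) kv.1)).map (fun kv => kv.2))))
    (PySem.Set.nodup_union _ _
      (PySem.Set.nodup_union _ _ (PySem.Set.nodup_ofList _)))
    (by
      intro x
      rw [PySem.Set.mem_union, List.mem_append, h2000 x, h2025 x])
  rw [e1, e2, e3]
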